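-- pv_equiv track=rewrite | github.com/kotharipeddirajulu/Cipherware | encode.py | Porta_encode
-- ===== SOURCE A (Python) =====
-- def Porta_key_generator(key):
--     alphabet = {
--         "A": [["A", "B", "C", "D", "E", "F", "G", "H", "I", "J", "K", "L", "M"],
--               ["N", "O", "P", "Q", "R", "S", "T", "U", "V", "W", "X", "Y", "Z"]],
--         "B": [["A", "B", "C", "D", "E", "F", "G", "H", "I", "J", "K", "L", "M"],
--               ["N", "O", "P", "Q", "R", "S", "T", "U", "V", "W", "X", "Y", "Z"]],
--         "C": [["A", "B", "C", "D", "E", "F", "G", "H", "I", "J", "K", "L", "M"],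
--               ["Z", "N", "O", "P", "Q", "R", "S", "T", "U", "V", "W", "X", "Y"]],
--         "D": [["A", "B", "C", "D", "E", "F", "G", "H", "I", "J", "K", "L", "M"],
--               ["Z", "N", "O", "P", "Q", "R", "S", "T", "U", "V", "W", "X", "Y"]],
--         "E": [["A", "B", "C", "D", "E", "F", "G", "H", "I", "J", "K", "L", "M"],
--               ["Y", "Z", "N", "O", "P", "Q", "R", "S", "T", "U", "V", "W", "X"]],
--         "F": [["A", "B", "C", "D", "E", "F", "G", "H", "I", "J", "K", "L", "M"],
--               ["Y", "Z", "N", "O", "P", "Q", "R", "S", "T", "U", "V", "W", "X"]],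
--         "G": [["A", "B", "C", "D", "E", "F", "G", "H", "I", "J", "K", "L", "M"],
--               ["X", "Y", "Z", "N", "O", "P", "Q", "R", "S", "T", "U", "V", "W"]],
--         "H": [["A", "B", "C", "D", "E", "F", "G", "H", "I", "J", "K", "L", "M"],
--               ["X", "Y", "Z", "N", "O", "P", "Q", "R", "S", "T", "U", "V", "W"]],
--         "I": [["A", "B", "C", "D", "E", "F", "G", "H", "I", "J", "K", "L", "M"],
--               ["W", "X", "Y", "Z", "N", "O", "P", "Q", "R", "S", "T", "U", "V"]],
--         "J": [["A", "B", "C", "D", "E", "F", "G", "H", "I", "J", "K", "L", "M"],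
--               ["W", "X", "Y", "Z", "N", "O", "P", "Q", "R", "S", "T", "U", "V"]],
--         "K": [["A", "B", "C", "D", "E", "F", "G", "H", "I", "J", "K", "L", "M"],
--               ["V", "W", "X", "Y", "Z", "N", "O", "P", "Q", "R", "S", "T", "U"]],
--         "L": [["A", "B", "C", "D", "E", "F", "G", "H", "I", "J", "K", "L", "M"],
--               ["V", "W", "X", "Y", "Z", "N", "O", "P", "Q", "R", "S", "T", "U"]],
--         "M": [["A", "B", "C", "D", "E", "F", "G", "H", "I", "J", "K", "L", "M"],
--               ["U", "V", "W", "X", "Y", "Z", "N", "O", "P", "Q", "R", "S", "T"]],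
--         "N": [["A", "B", "C", "D", "E", "F", "G", "H", "I", "J", "K", "L", "M"],
--               ["U", "V", "W", "X", "Y", "Z", "N", "O", "P", "Q", "R", "S", "T"]],
--         "O": [["A", "B", "C", "D", "E", "F", "G", "H", "I", "J", "K", "L", "M"],
--               ["T", "U", "V", "W", "X", "Y", "Z", "N", "O", "P", "Q", "R", "S"]],
--         "P": [["A", "B", "C", "D", "E", "F", "G", "H", "I", "J", "K", "L", "M"],
--               ["T", "U", "V", "W", "X", "Y", "Z", "N", "O", "P", "Q", "R", "S"]],
--         "Q": [["A", "B", "C", "D", "E", "F", "G", "H", "I", "J", "K", "L", "M"],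
--               ["S", "T", "U", "V", "W", "X", "Y", "Z", "N", "O", "P", "Q", "R"]],
--         "R": [["A", "B", "C", "D", "E", "F", "G", "H", "I", "J", "K", "L", "M"],
--               ["S", "T", "U", "V", "W", "X", "Y", "Z", "N", "O", "P", "Q", "R"]],
--         "S": [["A", "B", "C", "D", "E", "F", "G", "H", "I", "J", "K", "L", "M"],
--               ["R", "S", "T", "U", "V", "W", "X", "Y", "Z", "N", "O", "P", "Q"]],
--         "T": [["A", "B", "C", "D", "E", "F", "G", "H", "I", "J", "K", "L", "M"],
--               ["R", "S", "T", "U", "V", "W", "X", "Y", "Z", "N", "O", "P", "Q"]],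
--         "U": [["A", "B", "C", "D", "E", "F", "G", "H", "I", "J", "K", "L", "M"],
--               ["Q", "R", "S", "T", "U", "V", "W", "X", "Y", "Z", "N", "O", "P"]],
--         "V": [["A", "B", "C", "D", "E", "F", "G", "H", "I", "J", "K", "L", "M"],
--               ["Q", "R", "S", "T", "U", "V", "W", "X", "Y", "Z", "N", "O", "P"]],
--         "W": [["A", "B", "C", "D", "E", "F", "G", "H", "I", "J", "K", "L", "M"],
--               ["P", "Q", "R", "S", "T", "U", "V", "W", "X", "Y", "Z", "N", "O"]],
--         "X": [["A", "B", "C", "D", "E", "F", "G", "H", "I", "J", "K", "L", "M"],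
--               ["P", "Q", "R", "S", "T", "U", "V", "W", "X", "Y", "Z", "N", "O"]],
--         "Y": [["A", "B", "C", "D", "E", "F", "G", "H", "I", "J", "K", "L", "M"],
--               ["O", "P", "Q", "R", "S", "T", "U", "V", "W", "X", "Y", "Z", "N"]],
--         "Z": [["A", "B", "C", "D", "E", "F", "G", "H", "I", "J", "K", "L", "M"],
--               ["O", "P", "Q", "R", "S", "T", "U", "V", "W", "X", "Y", "Z", "N"]]}
--
--     tab = []
--     for alpha in key.upper():
--         tab.append(alphabet[alpha])
--     return tab
--
-- def Porta_getPositions(tab, alpha):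
--     row = -1
--     if alpha in tab[0]:
--         row = 0
--     elif alpha in tab[1]:
--         row = 1
--
--     if row != -1:
--         return (row, tab[row].index(alpha))
--     else:
--         return (None, None)
--
-- def Porta_getOpponent(tab, alpha):
--     row, col = Porta_getPositions(tab, alpha.upper())
--     if row == 1:
--         return tab[0][col]
--     elif row == 0:
--         return tab[1][col]
--     else:
--         return alpha
--
-- def Porta_encode(text, key):
--     encrypted = ''
--     count = 0
--     tab = Porta_key_generator(key)
--     for alpha in text.upper():
--         encrypted += Porta_getOpponent(tab[count], alpha)
--         count = (count + 1) % len(tab)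
--     return encrypted
-- ===== SOURCE B (Python) =====
-- def Porta_char(kc, c):
--     # one Porta substitution: key letter kc (A-Z), text char c (uppercase already)
--     shift = (ord(kc) - 65) // 2
--     if 'A' <= c <= 'M':
--         return chr(78 + (ord(c) - 65 - shift) % 13)
--     elif 'N' <= c <= 'Z':
--         return chr(65 + (ord(c) - 78 + shift) % 13)
--     else:
--         return c
--
-- def Porta_encode(text, key):
--     k = key.upper()
--     return ''.join(Porta_char(k[i % len(k)], c)
--                    for i, c in enumerate(text.upper()))
-- ===== Notes on version B (the rewrite author's own statement) =====
-- stated objective: simpler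
-- what changed: B replaces A's 26-entry lookup-table construction, row membership tests and list.index scans by direct modular arithmetic on character codes (shift = (ord(k)-65)//2, two mod-13 formulas), joining the results in one pass (no table build, no per-character list scans, no quadratic '+=' string growth).
import Mathlib
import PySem

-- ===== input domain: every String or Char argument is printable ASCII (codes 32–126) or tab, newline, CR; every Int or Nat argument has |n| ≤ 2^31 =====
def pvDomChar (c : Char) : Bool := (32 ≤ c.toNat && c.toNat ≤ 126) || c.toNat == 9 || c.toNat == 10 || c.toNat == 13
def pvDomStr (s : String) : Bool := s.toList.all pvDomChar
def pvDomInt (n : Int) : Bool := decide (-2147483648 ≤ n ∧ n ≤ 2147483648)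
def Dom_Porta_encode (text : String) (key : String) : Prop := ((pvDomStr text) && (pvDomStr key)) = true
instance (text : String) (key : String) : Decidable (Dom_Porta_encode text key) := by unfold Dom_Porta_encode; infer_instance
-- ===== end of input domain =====

-- B replaces A's per-key-letter lookup tables and list.index scans by direct
-- modular arithmetic on character codes (objective: simpler).

-- ===== PORT A =====
-- A's dict literal `alphabet`: every value's first row is the same list A..M;
-- rows are modelled as lists of Chars (Python's 1-char strings). A missing key
-- (a non-letter) is Python's KeyError, hence Option (none = KeyError).
def pvRow0 : List Char := ['A','B','C','D','E','F','G','H','I','J','K','L','M']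
def portaAlphabet? (k : Char) : Option (List Char × List Char) :=
  if k = 'A' ∨ k = 'B' then some (pvRow0, ['N','O','P','Q','R','S','T','U','V','W','X','Y','Z'])
  else if k = 'C' ∨ k = 'D' then some (pvRow0, ['Z','N','O','P','Q','R','S','T','U','V','W','X','Y'])
  else if k = 'E' ∨ k = 'F' then some (pvRow0, ['Y','Z','N','O','P','Q','R','S','T','U','V','W','X'])
  else if k = 'G' ∨ k = 'H' then some (pvRow0, ['X','Y','Z','N','O','P','Q','R','S','T','U','V','W'])
  else if k = 'I' ∨ k = 'J' then some (pvRow0, ['W','X','Y','Z','N','O','P','Q','R','S','T','U','V'])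
  else if k = 'K' ∨ k = 'L' then some (pvRow0, ['V','W','X','Y','Z','N','O','P','Q','R','S','T','U'])
  else if k = 'M' ∨ k = 'N' then some (pvRow0, ['U','V','W','X','Y','Z','N','O','P','Q','R','S','T'])
  else if k = 'O' ∨ k = 'P' then some (pvRow0, ['T','U','V','W','X','Y','Z','N','O','P','Q','R','S'])
  else if k = 'Q' ∨ k = 'R' then some (pvRow0, ['S','T','U','V','W','X','Y','Z','N','O','P','Q','R'])
  else if k = 'S' ∨ k = 'T' then some (pvRow0, ['R','S','T','U','V','W','X','Y','Z','N','O','P','Q'])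
  else if k = 'U' ∨ k = 'V' then some (pvRow0, ['Q','R','S','T','U','V','W','X','Y','Z','N','O','P'])
  else if k = 'W' ∨ k = 'X' then some (pvRow0, ['P','Q','R','S','T','U','V','W','X','Y','Z','N','O'])
  else if k = 'Y' ∨ k = 'Z' then some (pvRow0, ['O','P','Q','R','S','T','U','V','W','X','Y','Z','N'])
  else none

-- one step of `tab.append(alphabet[alpha])`; none once any key letter misses the dict
def Porta_keyStep (acc : Option (List (List Char × List Char))) (a : Char) :
    Option (List (List Char × List Char)) :=
  match acc with
  | none => none
  | some t => match portaAlphabet? a with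
    | none => none
    | some x => some (t ++ [x])

def Porta_key_generator (key : String) : Option (List (List Char × List Char)) :=
  (PySem.Str.upper key).toList.foldl Porta_keyStep (some [])

def Porta_getPositions (tab : List Char × List Char) (alpha : Char) : Option Int × Option Nat :=
  let row : Int := if alpha ∈ tab.1 then 0 else if alpha ∈ tab.2 then 1 else -1
  if row ≠ -1 then
    -- `tab[row].index(alpha)` always succeeds on this branch
    (some row, PySem.List.index? (if row = 0 then tab.1 else tab.2) alpha)
  else (none, none)

def Porta_getOpponent (tab : List Char × List Char) (alpha : Char) : Char :=
  let p := Porta_getPositions tab (PySem.Chars.upperChar alpha)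
  -- on the matched branches col is some and in range; the getD defaults are unreachable
  if p.1 = some 1 then tab.1.getD (p.2.getD 0) ' '
  else if p.1 = some 0 then tab.2.getD (p.2.getD 0) ' '
  else alpha

def Porta_encode (text : String) (key : String) : String :=
  match Porta_key_generator key with
  | none => ""   -- Python raises KeyError here: excluded by Pre_Porta_encode
  | some tab =>
    -- count stays a Nat: Python's count is a nonnegative int and % has a positive divisor;
    -- with tab = [] and nonempty text Python raises IndexError at tab[count]: excluded by Pre_
    let r := (PySem.Str.upper text).toList.foldl
      (fun (s : List Char × Nat) alpha =>
        (s.1 ++ [Porta_getOpponent (tab.getD s.2 ([], [])) alpha], (s.2 + 1) % tab.length))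
      ([], 0)
    String.mk r.1

-- ===== PORT B =====
def Porta_char (kc : Char) (c : Char) : Char :=
  let shift : Int := PySem.Int.floordiv ((kc.toNat : Int) - 65) 2
  if 'A' ≤ c ∧ c ≤ 'M' then Char.ofNat (Int.toNat (78 + PySem.Int.mod ((c.toNat : Int) - 65 - shift) 13))
  else if 'N' ≤ c ∧ c ≤ 'Z' then Char.ofNat (Int.toNat (65 + PySem.Int.mod ((c.toNat : Int) - 78 + shift) 13))
  else c

def Porta_encode_alt (text : String) (key : String) : String :=
  let k := (PySem.Str.upper key).toList
  -- ''.join over enumerate(text.upper()); k[i % len(k)] is a valid index whenever len(k) > 0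
  String.mk ((PySem.List.enumerate (PySem.Str.upper text).toList 0).map
    (fun p => Porta_char (PySem.List.pyGetD k (PySem.Int.mod p.1 (k.length : Int)) ' ') p.2))

-- ===== PRECONDITION & SPEC =====
-- Pre_ excludes exactly the inputs where A raises: a key containing a non-letter
-- (KeyError in Porta_key_generator) and an empty key with nonempty text (IndexError at tab[count]).
def Pre_Porta_encode (text : String) (key : String) : Prop :=
  key.toList.all PySem.Chars.isalpha = true ∧ (text.toList = [] ∨ key.toList ≠ [])
instance (text : String) (key : String) : Decidable (Pre_Porta_encode text key) := by
  unfold Pre_Porta_encode; infer_instance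
def pvWitness_Porta_encode : String × String := ("HELLO world!", "Key")

def Spec_Porta_encode (text : String) (key : String) (out : String) : Prop := out = Porta_encode_alt text key
instance (text : String) (key : String) (out : String) : Decidable (Spec_Porta_encode text key out) := by
  unfold Spec_Porta_encode; infer_instance

-- ===== CLAIM (what is proved, stated in full; the proofs are below) =====
def Claim_equal_Porta_encode : Prop := ∀ (text : String) (key : String), Dom_Porta_encode text key → Pre_Porta_encode text key → Spec_Porta_encode text key (Porta_encode text key)

-- ===== LEMMAS AND PROOFS =====
def pvLetters : List Char := (List.range' 65 26).map Char.ofNat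
def pvChars127 : List Char := (List.range 127).map Char.ofNat

theorem mem_pvChars127 (c : Char) (h : c.toNat < 127) : c ∈ pvChars127 :=
  List.mem_map.mpr ⟨c.toNat, List.mem_range.mpr h, Char.ofNat_toNat c⟩

theorem mem_pvLetters (c : Char) (h : 'A' ≤ c ∧ c ≤ 'Z') : c ∈ pvLetters := by
  obtain ⟨h1, h2⟩ := h
  simp only [Char.le_def, UInt32.le_iff_toNat_le] at h1 h2
  have e : c.toNat = c.val.toNat := rfl
  have eA : ('A' : Char).val.toNat = 65 := rfl
  have eZ : ('Z' : Char).val.toNat = 90 := rfl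
  refine List.mem_map.mpr ⟨c.toNat, List.mem_range'_1.mpr ⟨by omega, by omega⟩, Char.ofNat_toNat c⟩

-- all rows of every table consist of uppercase letters
theorem rows_bound : pvLetters.all (fun K =>
    ((portaAlphabet? K).getD ([], [])).1.all (fun x => decide ('A' ≤ x ∧ x ≤ 'Z')) &&
    ((portaAlphabet? K).getD ([], [])).2.all (fun x => decide ('A' ≤ x ∧ x ≤ 'Z'))) = true := by
  decide

theorem letters_isSome : pvLetters.all (fun K => (portaAlphabet? K).isSome) = true := by decide

theorem upper_alpha_mem : pvChars127.all (fun c =>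
    !PySem.Chars.isalpha c || decide (PySem.Chars.upperChar c ∈ pvLetters)) = true := by decide

theorem upper_ok : pvChars127.all (fun c =>
    !PySem.Chars.islower (PySem.Chars.upperChar c)) = true := by
  decide

-- the substitution agrees on uppercase letters (both arguments)
set_option maxRecDepth 8000 in
theorem perchar_letters : pvLetters.all (fun K => pvLetters.all (fun c =>
    Porta_getOpponent ((portaAlphabet? K).getD ([], [])) c == Porta_char K c)) = true := by
  decide

theorem perchar (K : Char) (hK : K ∈ pvLetters) (c : Char)
    (hlow : PySem.Chars.islower c = false) :
    Porta_getOpponent ((portaAlphabet? K).getD ([], [])) c = Porta_char K c := by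
  by_cases hAZ : 'A' ≤ c ∧ c ≤ 'Z'
  · have hcL := mem_pvLetters c hAZ
    have h1 := List.all_eq_true.mp perchar_letters K hK
    have h2 := List.all_eq_true.mp h1 c hcL
    exact eq_of_beq h2
  · -- c is no uppercase letter: both sides return c unchanged
    have hup : PySem.Chars.upperChar c = c := by
      simp [PySem.Chars.upperChar, hlow]
    have hrows := List.all_eq_true.mp rows_bound K hK
    rw [Bool.and_eq_true] at hrows
    have hr1 := List.all_eq_true.mp hrows.1
    have hr2 := List.all_eq_true.mp hrows.2
    have hn1 : c ∉ ((portaAlphabet? K).getD ([], [])).1 := fun h => hAZ (of_decide_eq_true (hr1 c h))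
    have hn2 : c ∉ ((portaAlphabet? K).getD ([], [])).2 := fun h => hAZ (of_decide_eq_true (hr2 c h))
    have hA : ¬ ('A' ≤ c ∧ c ≤ 'M') := by
      intro ⟨u, v⟩; exact hAZ ⟨u, le_trans v (by decide)⟩
    have hN : ¬ ('N' ≤ c ∧ c ≤ 'Z') := by
      intro ⟨u, v⟩; exact hAZ ⟨le_trans (by decide) u, v⟩
    simp only [Porta_getOpponent, Porta_getPositions, Porta_char, hup, hn1, hn2,
      if_neg hA, if_neg hN]
    simp

theorem gen_loop (l : List Char) :
    ∀ (acc : List (List Char × List Char)), (∀ c ∈ l, (portaAlphabet? c).isSome) →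
    l.foldl Porta_keyStep (some acc)
      = some (acc ++ l.map (fun c => (portaAlphabet? c).getD ([], []))) := by
  induction l with
  | nil => intro acc _; simp
  | cons a l ih =>
    intro acc h
    obtain ⟨x, hx⟩ := Option.isSome_iff_exists.mp (h a (List.mem_cons_self))
    have step : Porta_keyStep (some acc) a = some (acc ++ [x]) := by
      simp only [Porta_keyStep, hx]
    simp only [List.foldl_cons, step, List.map_cons, hx, Option.getD_some]
    rw [ih (acc ++ [x]) (fun c hc => h c (List.mem_cons_of_mem _ hc))]
    simp

theorem loop_eq (ks : List Char) (tab : List (List Char × List Char))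
    (htab : tab = ks.map (fun c => (portaAlphabet? c).getD ([], [])))
    (hks : ∀ K ∈ ks, K ∈ pvLetters) (hn : 0 < ks.length) (T : List Char)
    (hT : ∀ c ∈ T, PySem.Chars.islower c = false) :
    ∀ (i : Nat) (acc : List Char),
    T.foldl (fun (s : List Char × Nat) alpha =>
        (s.1 ++ [Porta_getOpponent (tab.getD s.2 ([], [])) alpha], (s.2 + 1) % tab.length))
      (acc, i % ks.length)
    = (acc ++ (PySem.List.enumerate T (i : Nat)).map
        (fun p => Porta_char (PySem.List.pyGetD ks (PySem.Int.mod p.1 (ks.length : Int)) ' ') p.2),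
       (i + T.length) % ks.length) := by
  have hlen : tab.length = ks.length := by rw [htab, List.length_map]
  induction T with
  | nil => intro i acc; simp [PySem.List.enumerate]
  | cons a T ih =>
    intro i acc
    have hm : i % ks.length < ks.length := Nat.mod_lt _ hn
    have hchar : Porta_getOpponent (tab.getD (i % ks.length) ([], [])) a
        = Porta_char (ks.getD (i % ks.length) ' ') a := by
      have e1 : tab.getD (i % ks.length) ([], [])
          = (portaAlphabet? ks[i % ks.length]).getD ([], []) := by
        rw [List.getD_eq_getElem tab _ (by omega)]
        simp [htab]
      have e2 : ks.getD (i % ks.length) ' ' = ks[i % ks.length] :=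
        List.getD_eq_getElem ks _ hm
      rw [e1, e2]
      exact perchar _ (hks _ (List.getElem_mem hm)) a (hT a List.mem_cons_self)
    have hmod : PySem.Int.mod ((i : Nat) : Int) ((ks.length : Nat) : Int)
        = (((i % ks.length : Nat)) : Int) := PySem.Int.mod_natCast i ks.length
    have hcount : (i % ks.length + 1) % tab.length = (i + 1) % ks.length := by
      rw [hlen, Nat.mod_add_mod]
    simp only [List.foldl_cons, hchar, hcount, PySem.List.enumerate_cons, List.map_cons]
    have : ((i : Int) + 1) = ((i + 1 : Nat) : Int) := by push_cast; ring
    rw [this, ih (fun c hc => hT c (List.mem_cons_of_mem _ hc)) (i + 1)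
      (acc ++ [Porta_char (ks.getD (i % ks.length) ' ') a])]
    simp only [hmod, PySem.List.pyGetD_natCast]
    rw [Prod.mk.injEq]
    refine ⟨by simp, by congr 1; simp; omega⟩

-- ===== VERDICT (by name: the statement is the Claim_ definition above) =====
theorem Porta_encode_spec : Claim_equal_Porta_encode := by
  unfold Claim_equal_Porta_encode Spec_Porta_encode
  intro text key hdom hpre
  obtain ⟨halpha, hemp⟩ := hpre
  unfold Dom_Porta_encode at hdom
  rw [Bool.and_eq_true] at hdom
  have hdText := List.all_eq_true.mp hdom.1
  have hdKey := List.all_eq_true.mp hdom.2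
  have dom_lt : ∀ c : Char, pvDomChar c = true → c.toNat < 127 := by
    intro c h
    simp only [pvDomChar, Bool.or_eq_true, Bool.and_eq_true, decide_eq_true_eq,
      beq_iff_eq] at h
    omega
  have upper_ok' := List.all_eq_true.mp upper_ok
  have hT : ∀ c ∈ (PySem.Str.upper text).toList, PySem.Chars.islower c = false := by
    intro c hc
    rw [PySem.Str.toList_upper, PySem.Chars.upper, List.mem_map] at hc
    obtain ⟨c', hc', rfl⟩ := hc
    have := upper_ok' c' (mem_pvChars127 c' (dom_lt c' (hdText c' hc')))
    rwa [Bool.not_eq_eq_eq_not, Bool.not_true] at this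
  have hks : ∀ K ∈ (PySem.Str.upper key).toList, K ∈ pvLetters := by
    intro K hK
    rw [PySem.Str.toList_upper, PySem.Chars.upper, List.mem_map] at hK
    obtain ⟨c', hc', rfl⟩ := hK
    have := List.all_eq_true.mp upper_alpha_mem c' (mem_pvChars127 c' (dom_lt c' (hdKey c' hc')))
    rcases Bool.or_eq_true _ _ |>.mp this with h | h
    · rw [Bool.not_eq_eq_eq_not, Bool.not_true] at h
      exact absurd (List.all_eq_true.mp halpha c' hc') (by simp [h])
    · exact of_decide_eq_true h
  by_cases hkey : key.toList = []
  · -- empty key: Pre_ forces empty text; both sides give ""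
    have htext : text.toList = [] := by
      rcases hemp with h | h
      · exact h
      · exact absurd hkey h
    have hupk : (PySem.Str.upper key).toList = [] := by
      rw [PySem.Str.toList_upper, hkey]; rfl
    have hupt : (PySem.Str.upper text).toList = [] := by
      rw [PySem.Str.toList_upper, htext]; rfl
    unfold Porta_encode Porta_encode_alt Porta_key_generator
    rw [hupk, hupt]
    rfl
  · -- nonempty key, every key letter alphabetic
    have hn : 0 < (PySem.Str.upper key).toList.length := by
      rw [PySem.Str.toList_upper, PySem.Chars.upper, List.length_map]
      cases h : key.toList with
      | nil => exact absurd h hkey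
      | cons a l => simp
    have hgen : Porta_key_generator key
        = some ((PySem.Str.upper key).toList.map (fun c => (portaAlphabet? c).getD ([], []))) := by
      unfold Porta_key_generator
      rw [gen_loop _ [] ?_]
      · simp
      · intro c hc
        have := hks c hc
        exact List.all_eq_true.mp letters_isSome c this
    unfold Porta_encode Porta_encode_alt
    have := loop_eq (PySem.Str.upper key).toList _ rfl hks hn (PySem.Str.upper text).toList hT 0 []
    rw [Nat.zero_mod, Nat.cast_zero] at this
    simp only [hgen]
    rw [this]
    simp
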